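-- pv_equiv track=rewrite | github.com/luca-viola/shamir | ShamirSecret.py | _extended_euclidean_gcd
-- ===== SOURCE A (Python) =====
-- def _extended_euclidean_gcd(a, b):
--     x = 0
--     last_x = 1
--     y = 1
--     last_y = 0
--     while b != 0:
--         quot = a // b
--         a, b = b, a%b
--         x, last_x = last_x - quot * x, x
--         y, last_y = last_y - quot * y, y
--     return last_x, last_y
-- ===== SOURCE B (Python) =====
-- def _extended_euclidean_gcd(a, b):
--     if b == 0:
--         return (1, 0)
--     x, y = _extended_euclidean_gcd(b, a % b)
--     return (y, x - (a // b) * y)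
-- ===== Notes on version B (the rewrite author's own statement) =====
-- stated objective: alternative
-- what changed: Replaces the iterative six-variable coefficient-tracking loop by a plain recursion that computes the base Bezout pair at b==0 and reconstructs the coefficients on unwind.
import Mathlib
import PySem

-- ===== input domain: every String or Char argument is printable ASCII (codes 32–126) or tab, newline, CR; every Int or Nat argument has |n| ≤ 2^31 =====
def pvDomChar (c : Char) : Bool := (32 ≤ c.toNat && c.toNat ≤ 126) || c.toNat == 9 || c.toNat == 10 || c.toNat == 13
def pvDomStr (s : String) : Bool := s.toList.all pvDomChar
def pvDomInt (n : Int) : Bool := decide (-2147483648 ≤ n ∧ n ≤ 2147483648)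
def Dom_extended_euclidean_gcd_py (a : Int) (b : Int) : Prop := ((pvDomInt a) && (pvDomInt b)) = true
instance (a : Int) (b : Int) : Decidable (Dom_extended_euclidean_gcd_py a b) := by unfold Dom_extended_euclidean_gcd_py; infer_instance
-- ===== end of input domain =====

-- B is an alternative of the same cost: the iterative coefficient-tracking loop is replaced
-- by a recursion that computes the base Bezout pair at b = 0 and rebuilds the coefficients on unwind.
-- Both programs are total; return values agree everywhere.

-- termination measure for both ports: |a % b| < |b| for Python's floor mod (b ≠ 0)
theorem pymod_natAbs_lt (a b : Int) (hb : b ≠ 0) :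
    (PySem.Int.mod a b).natAbs < b.natAbs := by
  rcases lt_or_gt_of_ne hb with h | h
  · have := PySem.Int.mod_neg_bounds a h
    omega
  · have h1 := PySem.Int.mod_nonneg a h
    have h2 := PySem.Int.mod_lt a h
    omega

-- ===== PORT A =====
-- the while loop of A, with state (a, b, x, last_x, y, last_y)
def egcdLoopA (a b x lx y ly : Int) : Int × Int :=
  if hb : b = 0 then (lx, ly)
  else
    let quot := PySem.Int.floordiv a b
    egcdLoopA b (PySem.Int.mod a b) (lx - quot * x) x (ly - quot * y) y
termination_by b.natAbs
decreasing_by exact pymod_natAbs_lt a b hb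

def extended_euclidean_gcd_py (a : Int) (b : Int) : Int × Int :=
  egcdLoopA a b 0 1 1 0

-- ===== PORT B =====
def extended_euclidean_gcd_py_alt (a : Int) (b : Int) : Int × Int :=
  if hb : b = 0 then (1, 0)
  else
    let p := extended_euclidean_gcd_py_alt b (PySem.Int.mod a b)
    (p.2, p.1 - PySem.Int.floordiv a b * p.2)
termination_by b.natAbs
decreasing_by exact pymod_natAbs_lt a b hb

-- ===== PRECONDITION & SPEC =====
def Spec_extended_euclidean_gcd_py (a : Int) (b : Int) (out : Int × Int) : Prop := out = extended_euclidean_gcd_py_alt a b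
instance (a : Int) (b : Int) (out : Int × Int) : Decidable (Spec_extended_euclidean_gcd_py a b out) := by unfold Spec_extended_euclidean_gcd_py; infer_instance

-- ===== CLAIM (what is proved, stated in full; the proofs are below) =====
def Claim_equal_extended_euclidean_gcd_py : Prop := ∀ (a : Int) (b : Int), Dom_extended_euclidean_gcd_py a b → Spec_extended_euclidean_gcd_py a b (extended_euclidean_gcd_py a b)

-- ===== LEMMAS AND PROOFS =====

-- loop invariant: A's loop is a linear combination of B's Bezout pair
theorem egcdLoopA_eq (b : Int) : ∀ (a x lx y ly : Int),
    egcdLoopA a b x lx y ly =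
      (lx * (extended_euclidean_gcd_py_alt a b).1 + x * (extended_euclidean_gcd_py_alt a b).2,
       ly * (extended_euclidean_gcd_py_alt a b).1 + y * (extended_euclidean_gcd_py_alt a b).2) := by
  induction b using (fun motive ih b => Nat.strongRecOn (motive := fun n => ∀ b : Int, b.natAbs = n → motive b)
    b.natAbs (fun n h b hb => ih b (fun b' hb' => h b'.natAbs (hb ▸ hb') b' rfl)) b rfl :
    ∀ motive : Int → Prop, (∀ b : Int, (∀ b' : Int, b'.natAbs < b.natAbs → motive b') → motive b) → ∀ b : Int, motive b) with
  | _ b ih =>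
    intro a x lx y ly
    by_cases hb : b = 0
    · subst hb
      rw [egcdLoopA, extended_euclidean_gcd_py_alt]
      simp
    · rw [egcdLoopA, extended_euclidean_gcd_py_alt]
      simp only [hb, dif_neg, not_false_iff]
      rw [ih (PySem.Int.mod a b) (pymod_natAbs_lt a b hb)]
      ring_nf

-- ===== VERDICT (by name: the statement is the Claim_ definition above) =====
theorem extended_euclidean_gcd_py_spec : Claim_equal_extended_euclidean_gcd_py := by
  intro a b _
  unfold Spec_extended_euclidean_gcd_py extended_euclidean_gcd_py
  rw [egcdLoopA_eq]
  ring_nf
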